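-- pv_equiv track=rewrite | github.com/JunmingDuan/UniWebCV | Tool/utility/generate_cv.py | author_CV
-- ===== SOURCE A (Python) =====
-- me = { "en": "J.M. Duan",
--        "zh": "段俊明"}
--
-- def author_CV(author, language="en", correspondence=False):
--     "Generate formatted author in CV"
--     author_formatted = ""
--     names = author.split(', ')
--     for i in range(len(names)):
--         if(names[i] == me[language]):
--             if correspondence == True:
--                 author_formatted += r"\pubauthorselfstyle{"+names[i]+r"\textsuperscript{*}}"
--                 # author_formatted += r"{\bfseries "+names[i]+"}"
--             else:
--                 author_formatted += r"\pubauthorselfstyle{"+names[i]+"}"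
--         else:
--             author_formatted += r"\pubauthorstyle{"+names[i]+"}"
--         if(len(names) == 1 or i == len(names)-1):
--             author_formatted += ","
--         elif(i == len(names)-2):
--             if(language == "en"):
--                 if len(names) < 3:
--                     author_formatted += " and "
--                 else:
--                     author_formatted += ", and "
--             else:
--                 author_formatted += "和"
--         else:
--             author_formatted += ", "
--
--     return author_formatted
-- ===== SOURCE B (Python) =====
-- me = { "en": "J.M. Duan",
--        "zh": "段俊明"}
--
-- def author_CV(author, language="en", correspondence=False):
--     "Generate formatted author in CV"
--     myname = me[language]
--
--     def style(n):
--         if n != myname: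
--             return r"\pubauthorstyle{" + n + "}"
--         star = r"\textsuperscript{*}" if correspondence else ""
--         return r"\pubauthorselfstyle{" + n + star + "}"
--
--     styled = [style(n) for n in author.split(', ')]
--     if len(styled) == 1:
--         return styled[0] + ","
--     if language == "en":
--         andsep = " and " if len(styled) < 3 else ", and "
--     else:
--         andsep = "和"
--     return ", ".join(styled[:-2] + [styled[-2] + andsep + styled[-1]]) + ","
-- ===== Notes on version B (the rewrite author's own statement) =====
-- stated objective: simpler
-- what changed: Replaces the per-index loop with its four-way separator branch by a map that styles each name once, followed by a closed slice-based assembly: the comma-joined prefix of all but the last two styled names, the last two glued with the and-separator chosen once from language and count, and the trailing comma appended at the end.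
import Mathlib
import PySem

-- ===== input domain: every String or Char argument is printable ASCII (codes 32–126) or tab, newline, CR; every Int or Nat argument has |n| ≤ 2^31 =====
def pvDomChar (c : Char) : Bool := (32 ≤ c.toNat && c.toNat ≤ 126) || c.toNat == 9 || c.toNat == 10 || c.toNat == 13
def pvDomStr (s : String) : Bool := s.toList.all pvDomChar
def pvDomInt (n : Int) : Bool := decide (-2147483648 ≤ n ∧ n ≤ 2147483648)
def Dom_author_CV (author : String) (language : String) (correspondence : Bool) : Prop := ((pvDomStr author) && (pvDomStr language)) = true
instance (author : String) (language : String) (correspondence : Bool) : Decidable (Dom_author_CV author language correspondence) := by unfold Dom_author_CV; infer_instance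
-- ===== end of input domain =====

-- B replaces A's per-index separator loop by a style-all-names map and a closed
-- slice-based assembly (objective: simpler); same return value on Pre_ (language a key of me).

-- the module-level dict me = {"en": ..., "zh": ...} (values kept as char lists; ports work over List Char)
def pvMe : PySem.Dict String (List Char) :=
  PySem.Dict.ofList [("en", "J.M. Duan".toList), ("zh", "段俊明".toList)]

-- ===== PORT A =====
def author_CV (author : String) (language : String) (correspondence : Bool) : String :=
  let names := PySem.Chars.splitOn author.toList ", ".toList
  let n : Int := names.length
  String.mk <| (PySem.List.pyRange 0 n).foldl (fun acc i =>
    let nm := PySem.List.pyGetD names i []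
    let acc :=
      if nm = pvMe.getD language [] then
        (if correspondence = true then
          acc ++ "\\pubauthorselfstyle{".toList ++ nm ++ "\\textsuperscript{*}}".toList
        else
          acc ++ "\\pubauthorselfstyle{".toList ++ nm ++ "}".toList)
      else
        acc ++ "\\pubauthorstyle{".toList ++ nm ++ "}".toList
    if n = 1 ∨ i = n - 1 then acc ++ ",".toList
    else if i = n - 2 then
      (if language = "en" then
        (if n < 3 then acc ++ " and ".toList else acc ++ ", and ".toList)
      else acc ++ "和".toList)
    else acc ++ ", ".toList) []

-- ===== PORT B =====
def pvStyle (myname : List Char) (correspondence : Bool) (nm : List Char) : List Char :=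
  if nm ≠ myname then "\\pubauthorstyle{".toList ++ nm ++ "}".toList
  else
    let star := if correspondence then "\\textsuperscript{*}".toList else []
    "\\pubauthorselfstyle{".toList ++ nm ++ star ++ "}".toList

def author_CV_alt (author : String) (language : String) (correspondence : Bool) : String :=
  let myname := pvMe.getD language []
  let styled := (PySem.Chars.splitOn author.toList ", ".toList).map (pvStyle myname correspondence)
  String.mk <|
    if styled.length = 1 then PySem.List.pyGetD styled 0 [] ++ ",".toList
    else
      let andsep :=
        if language = "en" then
          (if styled.length < 3 then " and ".toList else ", and ".toList)
        else "和".toList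
      PySem.Chars.join ", ".toList
        (PySem.List.slice styled none (some (-2)) ++
          [PySem.List.pyGetD styled (-2) [] ++ andsep ++ PySem.List.pyGetD styled (-1) []])
        ++ ",".toList

-- ===== PRECONDITION & SPEC =====
-- Pre_ excludes exactly the inputs where Python A raises KeyError: language not a key of me.
def Pre_author_CV (author : String) (language : String) (correspondence : Bool) : Prop :=
  language = "en" ∨ language = "zh"
instance (author : String) (language : String) (correspondence : Bool) : Decidable (Pre_author_CV author language correspondence) := by unfold Pre_author_CV; infer_instance
def pvWitness_author_CV : String × String × Bool := ("J.M. Duan, A. Bee", "en", true)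

def Spec_author_CV (author : String) (language : String) (correspondence : Bool) (out : String) : Prop := out = author_CV_alt author language correspondence
instance (author : String) (language : String) (correspondence : Bool) (out : String) : Decidable (Spec_author_CV author language correspondence out) := by unfold Spec_author_CV; infer_instance

-- ===== CLAIM (what is proved, stated in full; the proofs are below) =====
def Claim_equal_author_CV : Prop := ∀ (author : String) (language : String) (correspondence : Bool), Dom_author_CV author language correspondence → Pre_author_CV author language correspondence → Spec_author_CV author language correspondence (author_CV author language correspondence)

-- ===== LEMMAS AND PROOFS =====

-- splitOn never returns the empty list
theorem pv_go_ne_nil (sep : List Char) (fuel : Nat) (l cur : List Char) (acc : List (List Char)) :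
    PySem.Chars.splitOn.go sep fuel l cur acc ≠ [] := by
  induction fuel generalizing l cur acc with
  | zero => unfold PySem.Chars.splitOn.go; simp
  | succ n ih =>
    unfold PySem.Chars.splitOn.go
    cases l with
    | nil => simp
    | cons c rest =>
      by_cases h : sep.isPrefixOf (c :: rest) = true <;> simp [h] <;> exact ih _ _ _

theorem pv_splitOn_ne_nil (s sep : List Char) : PySem.Chars.splitOn s sep ≠ [] :=
  pv_go_ne_nil _ _ _ _ _

-- join over a snoc is the concatenation of the sep-suffixed prefix plus the last piece
theorem pv_join_snoc (sep y : List Char) (xs : List (List Char)) :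
    PySem.Chars.join sep (xs ++ [y]) =
      (xs.map (· ++ sep)).flatten ++ y := by
  induction xs with
  | nil => simp [PySem.Chars.join_singleton]
  | cons p rest ih =>
    cases rest with
    | nil => simp [PySem.Chars.join_cons_cons, PySem.Chars.join_singleton]
    | cons q r =>
      have h1 : ((p :: q :: r) ++ [y] : List (List Char)) = p :: q :: (r ++ [y]) := by simp
      have h2 : (q :: (r ++ [y]) : List (List Char)) = (q :: r) ++ [y] := rfl
      rw [h1, PySem.Chars.join_cons_cons, h2, ih]
      simp

-- the map over the initial segment of the index range is List.take
theorem pv_map_pyGetD_pyRange_take {α : Type} (xs : List α) (d : α) (k : Int)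
    (h0 : 0 ≤ k) (hk : k ≤ (xs.length : Int)) :
    (PySem.List.pyRange 0 k).map (fun j => PySem.List.pyGetD xs j d) = xs.take k.toNat := by
  have hsplit := PySem.List.pyRange_one_append 0 k (PySem.List.len xs) h0 (by simpa [PySem.List.len])
  have hfull := PySem.List.map_pyGetD_pyRange_zero xs d
  rw [hsplit, List.map_append, PySem.List.map_pyGetD_pyRange xs d h0] at hfull
  have hlen : ((PySem.List.pyRange 0 k).map (fun j => PySem.List.pyGetD xs j d)).length = k.toNat := by
    simp [PySem.List.length_pyRange_one]
  conv_rhs => rw [← hfull]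
  rw [List.take_append_of_le_length hlen.ge, List.take_of_length_le hlen.le]

-- the loop of A equals the closed assembly of B, for any nonempty name list
theorem pv_main (names : List (List Char)) (hne : names ≠ []) (myname : List Char)
    (correspondence : Bool) (language : String) :
    ((PySem.List.pyRange 0 (names.length : Int)).foldl (fun acc i =>
      let nm := PySem.List.pyGetD names i []
      let acc :=
        if nm = myname then
          (if correspondence = true then
            acc ++ "\\pubauthorselfstyle{".toList ++ nm ++ "\\textsuperscript{*}}".toList
          else
            acc ++ "\\pubauthorselfstyle{".toList ++ nm ++ "}".toList)
        else
          acc ++ "\\pubauthorstyle{".toList ++ nm ++ "}".toList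
      if (names.length : Int) = 1 ∨ i = (names.length : Int) - 1 then acc ++ ",".toList
      else if i = (names.length : Int) - 2 then
        (if language = "en" then
          (if (names.length : Int) < 3 then acc ++ " and ".toList else acc ++ ", and ".toList)
        else acc ++ "和".toList)
      else acc ++ ", ".toList) []) =
    (let styled := names.map (pvStyle myname correspondence)
     if styled.length = 1 then PySem.List.pyGetD styled 0 [] ++ ",".toList
     else
      let andsep :=
        if language = "en" then
          (if styled.length < 3 then " and ".toList else ", and ".toList)
        else "和".toList
      PySem.Chars.join ", ".toList
        (PySem.List.slice styled none (some (-2)) ++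
          [PySem.List.pyGetD styled (-2) [] ++ andsep ++ PySem.List.pyGetD styled (-1) []])
        ++ ",".toList) := by
  have hstyle : ∀ (acc nm : List Char),
      (if nm = myname then
        (if correspondence = true then
          acc ++ "\\pubauthorselfstyle{".toList ++ nm ++ "\\textsuperscript{*}}".toList
        else
          acc ++ "\\pubauthorselfstyle{".toList ++ nm ++ "}".toList)
      else acc ++ "\\pubauthorstyle{".toList ++ nm ++ "}".toList)
      = acc ++ pvStyle myname correspondence nm := by
    intro acc nm
    by_cases h : nm = myname <;> cases correspondence <;>
      simp [pvStyle, h, List.append_assoc]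
  have h1 : ∀ (init : List Char), ((PySem.List.pyRange 0 (names.length : Int)).foldl (fun acc i =>
      let nm := PySem.List.pyGetD names i []
      let acc :=
        if nm = myname then
          (if correspondence = true then
            acc ++ "\\pubauthorselfstyle{".toList ++ nm ++ "\\textsuperscript{*}}".toList
          else
            acc ++ "\\pubauthorselfstyle{".toList ++ nm ++ "}".toList)
        else
          acc ++ "\\pubauthorstyle{".toList ++ nm ++ "}".toList
      if (names.length : Int) = 1 ∨ i = (names.length : Int) - 1 then acc ++ ",".toList
      else if i = (names.length : Int) - 2 then
        (if language = "en" then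
          (if (names.length : Int) < 3 then acc ++ " and ".toList else acc ++ ", and ".toList)
        else acc ++ "和".toList)
      else acc ++ ", ".toList) init) =
      init ++ (PySem.List.pyRange 0 (names.length : Int)).flatMap (fun i =>
        pvStyle myname correspondence (PySem.List.pyGetD names i []) ++
        (if (names.length : Int) = 1 ∨ i = (names.length : Int) - 1 then ",".toList
         else if i = (names.length : Int) - 2 then
          (if language = "en" then
            (if (names.length : Int) < 3 then " and ".toList else ", and ".toList)
          else "和".toList)
         else ", ".toList)) := by
    intro init
    rw [← PySem.List.foldl_append_eq_flatMap]
    apply PySem.List.foldl_congr_mem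
    intro acc i _
    simp only [hstyle]
    split_ifs <;> simp [List.append_assoc]
  rw [h1, List.nil_append]
  clear h1 hstyle
  rcases names with _ | ⟨a, t⟩
  · exact absurd rfl hne
  rcases t with _ | ⟨b, t⟩
  · -- exactly one name
    have hr : PySem.List.pyRange 0 ((([a] : List (List Char)).length : Int)) = [0] := by
      simp only [List.length_cons, List.length_nil]
      rw [show ((0 + 1 : Nat) : Int) = 0 + 1 from by norm_num,
        PySem.List.pyRange_one_singleton]
    rw [hr]
    simp [PySem.List.pyGetD_zero_cons]
  · -- at least two names
    set ns := a :: b :: t with hns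
    have hlen : 2 ≤ ns.length := by simp [hns]
    set n : Nat := ns.length with hn
    set styled := ns.map (pvStyle myname correspondence) with hstyled
    have hslen : styled.length = n := by simp [hstyled, hn]
    have hsplit : PySem.List.pyRange 0 (n : Int) =
        PySem.List.pyRange 0 ((n : Int) - 2) ++ [(n : Int) - 2, (n : Int) - 1] := by
      rw [PySem.List.pyRange_one_append 0 ((n : Int) - 2) (n : Int) (by omega) (by omega)]
      congr 1
      rw [PySem.List.pyRange_one_cons (by omega)]
      rw [show (n : Int) - 2 + 1 = (n : Int) - 1 from by ring]
      rw [PySem.List.pyRange_one_cons (by omega)]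
      rw [show (n : Int) - 1 + 1 = (n : Int) from by ring,
        PySem.List.pyRange_one_eq_nil (by omega)]
    have i2 : ((n : Int) - 2).toNat = n - 2 := by omega
    have i1 : ((n : Int) - 1).toNat = n - 1 := by omega
    have e2 : PySem.List.pyGetD styled (-2) [] =
        pvStyle myname correspondence (PySem.List.pyGetD ns ((n : Int) - 2) []) := by
      rw [PySem.List.pyGetD_neg_ofNat styled 2 [] (by norm_num) (by omega),
        PySem.List.pyGetD_eq_getElem ns [] (by omega) (by omega)]
      simp only [hstyled, List.getElem_map, List.length_map, hn]
      simp only [show (((ns.length : Int)) - 2).toNat = ns.length - 2 from by omega]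
    have e1 : PySem.List.pyGetD styled (-1) [] =
        pvStyle myname correspondence (PySem.List.pyGetD ns ((n : Int) - 1) []) := by
      rw [PySem.List.pyGetD_neg_ofNat styled 1 [] (by norm_num) (by omega),
        PySem.List.pyGetD_eq_getElem ns [] (by omega) (by omega)]
      simp only [hstyled, List.getElem_map, List.length_map, hn]
      simp only [show (((ns.length : Int)) - 1).toNat = ns.length - 1 from by omega]
    have hpre : (PySem.List.pyRange 0 ((n : Int) - 2)).map (fun i =>
        pvStyle myname correspondence (PySem.List.pyGetD ns i []) ++
        (if (n : Int) = 1 ∨ i = (n : Int) - 1 then ",".toList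
         else if i = (n : Int) - 2 then
          (if language = "en" then
            (if (n : Int) < 3 then " and ".toList else ", and ".toList)
          else "和".toList)
         else ", ".toList)) = (styled.take (n - 2)).map (· ++ ", ".toList) := by
      have step1 : (PySem.List.pyRange 0 ((n : Int) - 2)).map (fun i =>
          pvStyle myname correspondence (PySem.List.pyGetD ns i []) ++
          (if (n : Int) = 1 ∨ i = (n : Int) - 1 then ",".toList
           else if i = (n : Int) - 2 then
            (if language = "en" then
              (if (n : Int) < 3 then " and ".toList else ", and ".toList)
            else "和".toList)
           else ", ".toList)) = (PySem.List.pyRange 0 ((n : Int) - 2)).map (fun i =>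
          pvStyle myname correspondence (PySem.List.pyGetD ns i []) ++ ", ".toList) := by
        apply List.map_congr_left
        intro i hi
        rw [PySem.List.mem_pyRange_one] at hi
        rw [if_neg (by omega), if_neg (by omega)]
      rw [step1]
      have step2 : (PySem.List.pyRange 0 ((n : Int) - 2)).map (fun i =>
          pvStyle myname correspondence (PySem.List.pyGetD ns i []) ++ ", ".toList) =
          ((PySem.List.pyRange 0 ((n : Int) - 2)).map (fun i => PySem.List.pyGetD ns i [])).map
            (fun nm => pvStyle myname correspondence nm ++ ", ".toList) := by
        rw [List.map_map]
        rfl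
      rw [step2, pv_map_pyGetD_pyRange_take ns [] ((n : Int) - 2) (by omega) (by omega), i2,
        hstyled, ← List.map_take, List.map_map]
      rfl
    rw [hsplit, List.flatMap_append, List.flatMap_def, hpre]
    simp only [List.flatMap_cons, List.flatMap_nil, List.append_nil]
    rw [if_neg (show ¬ ((n : Int) = 1 ∨ (n : Int) - 2 = (n : Int) - 1) from by omega)]
    simp only [or_true, if_true]
    rw [if_neg (show ¬ styled.length = 1 from by omega)]
    have hsl : PySem.List.slice styled none (some (-2)) = styled.take (styled.length - 2) := by
      simp [PySem.List.slice]
    rw [hsl, hslen, pv_join_snoc, e1, e2]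
    simp only [show ((n : Int) < 3) ↔ (n < 3) from by omega]
    simp [List.append_assoc]
-- ===== VERDICT (by name: the statement is the Claim_ definition above) =====
theorem author_CV_spec : Claim_equal_author_CV := by
  intro author language correspondence _ _
  unfold Spec_author_CV author_CV author_CV_alt
  exact congrArg String.mk (pv_main _ (pv_splitOn_ne_nil _ _) _ _ _)
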